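-- pv_equiv track=rewrite | github.com/glowisn/algorithm | 프로그래머스/lv2/42626. 더 맵게/더 맵게.py | solution
-- ===== SOURCE A (Python) =====
-- import heapq
--
-- def mix(sco:heapq):
--     a = heapq.heappop(sco)
--     b = heapq.heappop(sco)
--     heapq.heappush(sco,a + 2*b)
--
--     return sco
--
-- def solution(sco, K):
--     heapq.heapify(sco)
--     time = 0
--     while any(item < K for item in sco):
--         time += 1
--         if len(sco) == 1:
--             return -1
--         sco = mix(sco)
--
--     return time
-- ===== SOURCE B (Python) =====
-- def solution(sco, K):
--     # sort once, then merge the original values with the queue of mixed values: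
--     # mixed values are produced in nondecreasing order, so two front pointers
--     # always give the two smallest remaining values.  (Does not mutate sco.)
--     xs = sorted(sco)
--     mixed = []
--     i = 0  # front of xs
--     j = 0  # front of mixed
--     time = 0
--
--     def pop():
--         nonlocal i, j
--         if i < len(xs) and (j >= len(mixed) or xs[i] <= mixed[j]):
--             v = xs[i]
--             i += 1
--         else:
--             v = mixed[j]
--             j += 1
--         return v
--
--     while True:
--         rem = (len(xs) - i) + (len(mixed) - j)
--         if rem == 0:
--             return time
--         if i < len(xs) and (j >= len(mixed) or xs[i] <= mixed[j]):
--             front = xs[i]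
--         else:
--             front = mixed[j]
--         if front >= K:
--             return time
--         time += 1
--         if rem == 1:
--             return -1
--         a = pop()
--         b = pop()
--         mixed.append(a + 2 * b)
-- ===== Notes on version B (the rewrite author's own statement) =====
-- stated objective: faster
-- what changed: B replaces A's heap plus a full any(item<K) scan of the heap before every round by one initial sort and two front pointers (original values and the queue of mixed values, which come out nondecreasing), so each round peeks only at the smallest remaining element and runs in O(1).
import Mathlib
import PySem

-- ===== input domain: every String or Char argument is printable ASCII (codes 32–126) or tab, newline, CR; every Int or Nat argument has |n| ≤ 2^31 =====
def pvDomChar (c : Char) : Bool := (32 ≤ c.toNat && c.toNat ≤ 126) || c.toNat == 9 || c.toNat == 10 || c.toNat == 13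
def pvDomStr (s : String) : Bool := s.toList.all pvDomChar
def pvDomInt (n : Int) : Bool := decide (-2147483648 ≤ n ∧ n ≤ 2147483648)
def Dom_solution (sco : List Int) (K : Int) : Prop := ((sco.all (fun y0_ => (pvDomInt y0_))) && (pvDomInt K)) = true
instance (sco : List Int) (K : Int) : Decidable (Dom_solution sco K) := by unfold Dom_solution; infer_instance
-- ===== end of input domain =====

-- B replaces A's heap + full `any` scan per round by one initial sort and two front
-- pointers (mixed values come out nondecreasing), checking only the smallest element.
-- A mutates `sco` in place (heapify); B does not: the equivalence is about the return value.

-- ===== PORT A =====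
-- heapq.heappop is ported by its contract: it returns the minimum of the heap and
-- leaves the remaining elements (the internal array layout of heapq is not observable
-- in the result); heapq.heappush adds an element; heapq.heapify reorders in place
-- (identity on the multiset of elements).
def popMinA : List Int → Int × List Int
  | [] => (0, [])
  | [x] => (x, [])
  | x :: y :: r =>
    let p := popMinA (y :: r)
    if x ≤ p.1 then (x, y :: r) else (p.1, x :: p.2)

def mixA (sco : List Int) : List Int :=
  let p1 := popMinA sco
  let p2 := popMinA p1.2
  p2.2 ++ [p1.1 + 2 * p2.1]

def loopA (K : Int) : Nat → List Int → Int → Int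
  | 0, _, time => time
  | f + 1, sco, time =>
    if sco.any (fun item => decide (item < K)) then
      if sco.length == 1 then -1
      else loopA K f (mixA sco) (time + 1)
    else time

def solution (sco : List Int) (K : Int) : Int :=
  loopA K sco.length sco 0

-- ===== PORT B =====
-- pop(): take the smaller front of the sorted originals and of the mixed queue
-- (preferring the originals on a tie), exactly as Source B's index pointers do
-- (the suffix from the pointer on is the list here).
def popB (xs mx : List Int) : Int × List Int × List Int :=
  match xs, mx with
  | [], [] => (0, [], [])
  | x :: xr, [] => (x, xr, [])
  | [], m :: mr => (m, [], mr)
  | x :: xr, m :: mr => if x ≤ m then (x, xr, m :: mr) else (m, x :: xr, mr)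

def loopB (K : Int) : Nat → List Int → List Int → Int → Int
  | 0, _, _, time => time
  | f + 1, xs, mx, time =>
    if xs.length + mx.length == 0 then time
    else
      let p1 := popB xs mx
      if p1.1 < K then
        if xs.length + mx.length == 1 then -1
        else
          let p2 := popB p1.2.1 p1.2.2
          loopB K f p2.2.1 (p2.2.2 ++ [p1.1 + 2 * p2.1]) (time + 1)
      else time

def solution_alt (sco : List Int) (K : Int) : Int :=
  loopB K sco.length (PySem.List.sorted sco (fun x => x) false) [] 0

-- ===== PRECONDITION & SPEC =====
def Spec_solution (sco : List Int) (K : Int) (out : Int) : Prop := out = solution_alt sco K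
instance (sco : List Int) (K : Int) (out : Int) : Decidable (Spec_solution sco K out) := by unfold Spec_solution; infer_instance

-- ===== CLAIM (what is proved, stated in full; the proofs are below) =====
def Claim_equal_solution : Prop := ∀ (sco : List Int) (K : Int), Dom_solution sco K → Spec_solution sco K (solution sco K)

-- ===== LEMMAS AND PROOFS =====

-- `MB β mx`: every element of the mixed queue except the last is ≥ β, and the last is ≤ 3β.
def MB (β : Int) : List Int → Prop
  | [] => True
  | [L] => L ≤ 3 * β
  | y :: rest => β ≤ y ∧ MB β rest

lemma popMinA_spec : ∀ (l : List Int), l ≠ [] →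
    l.Perm ((popMinA l).1 :: (popMinA l).2) ∧ ∀ y ∈ l, (popMinA l).1 ≤ y := by
  intro l hne
  induction l with
  | nil => exact absurd rfl hne
  | cons x r ih =>
    cases r with
    | nil => simp [popMinA]
    | cons y t =>
      obtain ⟨ihp, ihm⟩ := ih (by simp)
      have hpop : popMinA (x :: y :: t) =
          if x ≤ (popMinA (y :: t)).1 then (x, y :: t)
          else ((popMinA (y :: t)).1, x :: (popMinA (y :: t)).2) := rfl
      by_cases h : x ≤ (popMinA (y :: t)).1
      · rw [hpop, if_pos h]
        constructor
        · rfl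
        · intro z hz
          rcases List.mem_cons.mp hz with rfl | hz'
          · exact le_rfl
          · exact le_trans h (ihm z hz')
      · rw [hpop, if_neg h]
        constructor
        · exact (List.Perm.cons x ihp).trans (List.Perm.swap _ _ _)
        · intro z hz
          rcases List.mem_cons.mp hz with rfl | hz'
          · exact le_of_lt (lt_of_not_ge h)
          · exact ihm z hz'

lemma pop_unique {l r r' : List Int} {v v' : Int}
    (h1 : l.Perm (v :: r)) (h2 : ∀ y ∈ l, v ≤ y)
    (h3 : l.Perm (v' :: r')) (h4 : ∀ y ∈ l, v' ≤ y) :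
    v = v' ∧ r.Perm r' := by
  have hv : v ∈ l := h1.symm.mem_iff.mp (List.mem_cons_self ..)
  have hv' : v' ∈ l := h3.symm.mem_iff.mp (List.mem_cons_self ..)
  have hvv : v = v' := le_antisymm (h2 v' hv') (h4 v hv)
  subst hvv
  exact ⟨rfl, (h1.symm.trans h3).cons_inv⟩

lemma popB_spec : ∀ (xs mx : List Int), xs ++ mx ≠ [] →
    List.Pairwise (· ≤ ·) xs → List.Pairwise (· ≤ ·) mx →
    (xs ++ mx).Perm ((popB xs mx).1 :: ((popB xs mx).2.1 ++ (popB xs mx).2.2)) ∧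
    (∀ y ∈ xs ++ mx, (popB xs mx).1 ≤ y) ∧
    List.Pairwise (· ≤ ·) (popB xs mx).2.1 ∧ List.Pairwise (· ≤ ·) (popB xs mx).2.2 ∧
    ((popB xs mx).2.1 = xs ∨ (popB xs mx).2.1 = xs.tail) ∧
    ((popB xs mx).2.2 = mx ∨ (popB xs mx).2.2 = mx.tail) := by
  intro xs mx hne hx hm
  match xs, mx with
  | [], [] => exact absurd rfl hne
  | x :: xr, [] =>
    simp only [popB]
    refine ⟨by rfl, ?_, (List.pairwise_cons.mp hx).2, by trivial, by simp, by simp⟩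
    intro y hy
    rcases List.mem_append.mp hy with hy' | hy'
    · rcases List.mem_cons.mp hy' with rfl | hy'' 
      · exact le_rfl
      · exact (List.pairwise_cons.mp hx).1 y hy''
    · simp at hy'
  | [], m :: mr =>
    simp only [popB]
    refine ⟨by rfl, ?_, by trivial, (List.pairwise_cons.mp hm).2, by simp, by simp⟩
    intro y hy
    rcases List.mem_append.mp hy with hy' | hy'
    · simp at hy'
    · rcases List.mem_cons.mp hy' with rfl | hy''
      · exact le_rfl
      · exact (List.pairwise_cons.mp hm).1 y hy''
  | x :: xr, m :: mr =>
    by_cases h : x ≤ m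
    · simp only [popB, if_pos h]
      refine ⟨by rfl, ?_, (List.pairwise_cons.mp hx).2, hm, by simp, by simp⟩
      intro y hy
      rcases List.mem_append.mp hy with hy' | hy'
      · rcases List.mem_cons.mp hy' with rfl | hy''
        · exact le_rfl
        · exact (List.pairwise_cons.mp hx).1 y hy''
      · rcases List.mem_cons.mp hy' with rfl | hy''
        · exact h
        · exact le_trans h ((List.pairwise_cons.mp hm).1 y hy'')
    · have hmx : m ≤ x := le_of_lt (lt_of_not_ge h)
      simp only [popB, if_neg h]
      refine ⟨?_, ?_, hx, (List.pairwise_cons.mp hm).2, by simp, by simp⟩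
      · exact List.perm_middle
      · intro y hy
        rcases List.mem_append.mp hy with hy' | hy'
        · rcases List.mem_cons.mp hy' with rfl | hy''
          · exact hmx
          · exact le_trans hmx ((List.pairwise_cons.mp hx).1 y hy'')
        · rcases List.mem_cons.mp hy' with rfl | hy''
          · exact le_rfl
          · exact (List.pairwise_cons.mp hm).1 y hy''

lemma MB_tail {β : Int} : ∀ {l : List Int}, MB β l → MB β l.tail := by
  intro l h
  match l with
  | [] => trivial
  | [L] => trivial
  | y :: z :: r => exact h.2

lemma MB_upper {β : Int} : ∀ {l : List Int}, List.Pairwise (· ≤ ·) l → MB β l →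
    ∀ y ∈ l, y ≤ 3 * β := by
  intro l
  induction l with
  | nil => intro _ _ y hy; simp at hy
  | cons y r ih =>
    intro hp hm z hz
    match r, hm with
    | [], hm =>
      rcases List.mem_cons.mp hz with rfl | hz'
      · exact hm
      · simp at hz'
    | w :: r', hm =>
      have hrest : ∀ u ∈ w :: r', u ≤ 3 * β := ih (List.pairwise_cons.mp hp).2 hm.2
      rcases List.mem_cons.mp hz with rfl | hz'
      · exact le_trans ((List.pairwise_cons.mp hp).1 w (List.mem_cons_self ..)) (hrest w (List.mem_cons_self ..))
      · exact hrest z hz'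

lemma MB_head {β y : Int} {rest : List Int} (h : MB β (y :: rest)) (hne : rest ≠ []) : β ≤ y := by
  match rest, h with
  | [], _ => exact absurd rfl hne
  | z :: r, h => exact h.1

lemma MB_append_last {β v : Int} : ∀ {q : List Int}, (∀ y ∈ q, β ≤ y) → v ≤ 3 * β →
    MB β (q ++ [v]) := by
  intro q
  induction q with
  | nil => intro _ hv; exact hv
  | cons y q' ih =>
    intro hq hv
    have h1 : β ≤ y := hq y (List.mem_cons_self ..)
    have h2 : MB β (q' ++ [v]) := ih (fun z hz => hq z (List.mem_cons_of_mem _ hz)) hv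
    rw [List.cons_append]
    rcases hq' : q' ++ [v] with _ | ⟨z, r⟩
    · exact absurd hq' (by simp)
    · rw [hq'] at h2
      exact ⟨h1, h2⟩

lemma popB_mb {β : Int} (xs mx : List Int)
    (hxβ : ∀ y ∈ xs, β ≤ y) (hmb : MB β mx) :
    (∀ y ∈ (popB xs mx).2.1, β ≤ y) ∧ MB β (popB xs mx).2.2 ∧
    ((popB xs mx).2.2 ≠ [] → β ≤ (popB xs mx).1) := by
  match xs, mx with
  | [], [] => exact ⟨by simp [popB], trivial, by simp [popB]⟩
  | x :: xr, [] =>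
    exact ⟨fun y hy => hxβ y (by simp [popB] at hy; simp [hy]), trivial, by simp [popB]⟩
  | [], m :: mr =>
    refine ⟨by simp [popB], ?_, ?_⟩
    · simpa [popB] using MB_tail (l := m :: mr) hmb
    · intro hne
      simp only [popB] at hne ⊢
      exact MB_head hmb hne
  | x :: xr, m :: mr =>
    by_cases h : x ≤ m
    · refine ⟨?_, by simpa [popB, h] using hmb, ?_⟩
      · intro y hy
        simp only [popB, if_pos h] at hy
        exact hxβ y (List.mem_cons_of_mem _ hy)
      · intro _; simp only [popB, if_pos h]
        exact hxβ x (List.mem_cons_self ..)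
    · refine ⟨?_, ?_, ?_⟩
      · intro y hy
        simp only [popB, if_neg h] at hy
        exact hxβ y hy
      · simpa [popB, h] using MB_tail (l := m :: mr) hmb
      · intro hne
        simp only [popB, if_neg h] at hne ⊢
        exact MB_head hmb hne

lemma mainAB (K : Int) : ∀ (f : Nat) (l xs mx : List Int) (β : Int) (t : Int),
    l.Perm (xs ++ mx) → List.Pairwise (· ≤ ·) xs → List.Pairwise (· ≤ ·) mx →
    (∀ y ∈ xs, β ≤ y) → MB β mx →
    loopA K f l t = loopB K f xs mx t := by
  intro f
  induction f with
  | zero => intro l xs mx β t _ _ _ _ _; rfl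
  | succ f ih =>
    intro l xs mx β t hp hx hm hxβ hmb
    by_cases hpool : xs ++ mx = []
    · have hl : l = [] := List.Perm.eq_nil (by rw [hpool] at hp; exact hp)
      obtain ⟨hxs0, hmx0⟩ := List.append_eq_nil_iff.mp hpool
      subst hl; subst hxs0; subst hmx0
      simp [loopA, loopB]
    · obtain ⟨hPperm, hPmin, hPx1, hPm1, hsx1, hsm1⟩ := popB_spec xs mx hpool hx hm
      set a := (popB xs mx).1 with ha
      set xs₁ := (popB xs mx).2.1 with hxs₁
      set mx₁ := (popB xs mx).2.2 with hmx₁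
      have hlen : l.length = xs.length + mx.length := by
        rw [hp.length_eq, List.length_append]
      have hamem : a ∈ l := hp.symm.mem_iff.mp (hPperm.symm.mem_iff.mp (List.mem_cons_self ..))
      have hamin : ∀ y ∈ l, a ≤ y := fun y hy => hPmin y (hp.mem_iff.mp hy)
      have hlperm : l.Perm (a :: (xs₁ ++ mx₁)) := hp.trans hPperm
      have hne0 : (xs.length + mx.length == 0) = false := by
        simp only [beq_eq_false_iff_ne, ne_eq]
        intro h0
        exact hpool (List.eq_nil_of_length_eq_zero (by rw [List.length_append]; omega))
      by_cases hK : a < K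
      · have hany : l.any (fun item => decide (item < K)) = true := by
          rw [List.any_eq_true]
          exact ⟨a, hamem, by simpa using hK⟩
        by_cases hn1 : xs.length + mx.length = 1
        · have hl1 : (l.length == 1) = true := by simp [hlen, hn1]
          have hA : loopA K (f + 1) l t = -1 := by
            simp [loopA, hany, hl1]
          have hB : loopB K (f + 1) xs mx t = -1 := by
            simp [loopB, hn1, ← ha, hK]
          rw [hA, hB]
        · -- at least two elements
          have hlen0 : xs.length + mx.length ≠ 0 := by
            intro h0
            exact hpool (List.eq_nil_of_length_eq_zero (by rw [List.length_append]; omega))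
          have hn2 : 2 ≤ xs.length + mx.length := by omega
          have hlne : l ≠ [] := List.ne_nil_of_length_pos (by omega)
          obtain ⟨hA1perm, hA1min⟩ := popMinA_spec l hlne
          obtain ⟨haeq, hr1perm⟩ := pop_unique hA1perm hA1min hlperm hamin
          set r1 := (popMinA l).2 with hr1
          -- second pop
          have hr1len : r1.length = xs₁.length + mx₁.length := by
            have := hr1perm.length_eq
            rwa [List.length_append] at this
          have hpool1 : xs₁ ++ mx₁ ≠ [] := by
            intro h0
            have : l.length = 1 := by
              rw [hlperm.length_eq]; simp [h0]
            omega
          obtain ⟨hQperm, hQmin, hQx2, hQm2, hsx2, hsm2⟩ := popB_spec xs₁ mx₁ hpool1 hPx1 hPm1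
          set b := (popB xs₁ mx₁).1 with hb
          set xs₂ := (popB xs₁ mx₁).2.1 with hxs₂
          set mx₂ := (popB xs₁ mx₁).2.2 with hmx₂
          have hr1ne : r1 ≠ [] := List.ne_nil_of_length_pos (by
            have := List.length_pos_of_ne_nil hpool1
            rw [List.length_append] at this
            omega)
          obtain ⟨hA2perm, hA2min⟩ := popMinA_spec r1 hr1ne
          have hr1perm' : r1.Perm (b :: (xs₂ ++ mx₂)) := hr1perm.trans hQperm
          have hbmin : ∀ y ∈ r1, b ≤ y := fun y hy => hQmin y (hr1perm.mem_iff.mp hy)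
          obtain ⟨hbeq, hr2perm⟩ := pop_unique hA2perm hA2min hr1perm' hbmin
          -- a ≤ b
          have hbmem : b ∈ l := by
            have : b ∈ r1 := hr1perm'.symm.mem_iff.mp (List.mem_cons_self ..)
            exact hlperm.symm.mem_iff.mp (List.mem_cons.mpr (Or.inr (hr1perm.mem_iff.mp this)))
          have hab : a ≤ b := hamin b hbmem
          -- β bounds from popB_mb
          obtain ⟨hxs₁β, hmb₁, hcond₁⟩ := popB_mb xs mx hxβ hmb
          obtain ⟨hxs₂β, hmb₂, hcond₂⟩ := popB_mb xs₁ mx₁ hxs₁β hmb₁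
          -- new mixed-queue structure
          have hble : ∀ y ∈ xs₂ ++ mx₂, b ≤ y := by
            intro y hy
            exact hQmin y (hQperm.symm.mem_iff.mp (List.mem_cons_of_mem _ hy))
          have hmx₂sub : ∀ y ∈ mx₂, y ∈ mx := by
            intro y hy
            have h1 : y ∈ mx₁ := by
              rcases hsm2 with h | h
              · rwa [← h]
              · rw [h] at hy; exact List.mem_of_mem_tail hy
            rcases hsm1 with h | h
            · rwa [← h]
            · rw [h] at h1; exact List.mem_of_mem_tail h1
          have hmixpw : List.Pairwise (· ≤ ·) (mx₂ ++ [a + 2 * b]) := by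
            rw [List.pairwise_append]
            refine ⟨hQm2, by simp, ?_⟩
            intro y hy z hz
            have hz' : z = a + 2 * b := by simpa using hz
            subst hz'
            have hmx₂ne : mx₂ ≠ [] := by intro h0; rw [h0] at hy; simp at hy
            have hmx₁ne : mx₁ ≠ [] := by
              intro h0
              rcases hsm2 with h | h
              · rw [h0] at h; exact hmx₂ne h
              · rw [h0] at h; simp at h; exact hmx₂ne h
            have hβa : β ≤ a := hcond₁ hmx₁ne
            have hβb : β ≤ b := hcond₂ hmx₂ne
            have hy3 : y ≤ 3 * β := MB_upper hm hmb y (hmx₂sub y hy)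
            omega
          have hmixmb : MB b (mx₂ ++ [a + 2 * b]) := by
            refine MB_append_last ?_ (by omega)
            intro y hy
            exact hble y (List.mem_append.mpr (Or.inr hy))
          have hxs₂b : ∀ y ∈ xs₂, b ≤ y := fun y hy => hble y (List.mem_append.mpr (Or.inl hy))
          -- the recursive arguments correspond
          have hmixperm : (mixA l).Perm (xs₂ ++ (mx₂ ++ [a + 2 * b])) := by
            have h1 : mixA l = (popMinA r1).2 ++ [a + 2 * b] := by
              simp only [mixA, ← hr1, haeq, hbeq]
            rw [h1]
            exact (List.Perm.append_right _ hr2perm).trans (by rw [List.append_assoc])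
          have hl1 : (l.length == 1) = false := by
            simp only [beq_eq_false_iff_ne, ne_eq]; omega
          have hn1' : (xs.length + mx.length == 1) = false := by
            simp only [beq_eq_false_iff_ne, ne_eq]; omega
          simp only [loopA, loopB, hany, if_true, hl1, hne0, hn1', ← ha, ← hb, ← hxs₁, ← hmx₁, ← hxs₂, ← hmx₂]
          rw [if_pos hK]
          simp only [Bool.false_eq_true, if_false]
          exact ih (mixA l) xs₂ (mx₂ ++ [a + 2 * b]) b (t + 1) hmixperm hQx2 hmixpw hxs₂b hmixmb
      · -- smallest element ≥ K : both sides stop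
        have hany : l.any (fun item => decide (item < K)) = false := by
          rw [List.any_eq_false]
          intro y hy
          simp only [decide_eq_true_eq]
          intro hyK
          exact hK (lt_of_le_of_lt (hamin y hy) hyK)
        simp only [loopA, loopB, hany, hne0, ← ha]
        simp [hK]

-- ===== VERDICT (by name: the statement is the Claim_ definition above) =====
theorem solution_spec : Claim_equal_solution := by
  intro sco K _
  unfold Spec_solution solution solution_alt
  have hperm : (PySem.List.sorted sco (fun x => x) false).Perm sco :=
    PySem.List.sorted_perm sco (fun x => x) false
  have hpw : List.Pairwise (· ≤ ·) (PySem.List.sorted sco (fun x => x) false) := by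
    simpa using PySem.List.sorted_pairwise sco (fun x => x)
  have hperm' : sco.Perm (PySem.List.sorted sco (fun x => x) false ++ []) := by
    rw [List.append_nil]; exact hperm.symm
  have headD_min : ∀ (u : List Int), List.Pairwise (· ≤ ·) u → ∀ y ∈ u, u.headD 0 ≤ y := by
    intro u hu y hy
    cases u with
    | nil => simp at hy
    | cons h tl =>
      rcases List.mem_cons.mp hy with rfl | hy'
      · exact le_rfl
      · exact (List.pairwise_cons.mp hu).1 y hy'
  exact mainAB K sco.length sco _ [] _ 0 hperm' hpw List.Pairwise.nil (headD_min _ hpw) trivial
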